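-- pv_equiv track=rewrite | github.com/samuelo49/DS-ALGOS | hashtable/numelementsrepeatedxtimes.py | countExactOccurrences
-- ===== SOURCE A (Python) =====
-- def countExactOccurrences(arr, exactOccurrences):
--     countElements = {}
--     numCounter = 0
--     for element in arr:
--         if element not in countElements:
--             countElements[element] = 1
--         else:
--             countElements[element] += 1
--     for num, count in countElements.items():
--         if count == exactOccurrences:
--             numCounter += 1
--     return numCounter
-- ===== SOURCE B (Python) =====
-- def countExactOccurrences(arr, exactOccurrences):
--     counter = 0
--     run = 0
--     prev = None
--     for x in sorted(arr):
--         if run > 0 and x == prev: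
--             run += 1
--         else:
--             if run == exactOccurrences and run > 0:
--                 counter += 1
--             run = 1
--             prev = x
--     if run == exactOccurrences and run > 0:
--         counter += 1
--     return counter
-- ===== Notes on version B (the rewrite author's own statement) =====
-- stated objective: alternative
-- what changed: Replaced the hash-map frequency table plus a second pass over its items with a sort-then-scan over runs of equal values, maintaining only the current run length and closing a run when the value changes.
import Mathlib
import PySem

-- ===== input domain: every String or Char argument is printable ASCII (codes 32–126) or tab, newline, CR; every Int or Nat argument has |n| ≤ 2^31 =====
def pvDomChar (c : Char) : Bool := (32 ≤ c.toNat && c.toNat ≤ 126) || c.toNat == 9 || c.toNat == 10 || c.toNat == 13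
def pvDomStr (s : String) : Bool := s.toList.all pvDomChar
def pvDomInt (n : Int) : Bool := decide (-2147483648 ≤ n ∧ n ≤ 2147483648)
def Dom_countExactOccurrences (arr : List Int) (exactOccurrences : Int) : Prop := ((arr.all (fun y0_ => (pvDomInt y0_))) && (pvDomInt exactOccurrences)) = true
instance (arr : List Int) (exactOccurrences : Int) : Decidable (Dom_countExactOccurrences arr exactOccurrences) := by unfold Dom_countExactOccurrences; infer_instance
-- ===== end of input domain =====

-- B replaces A's hash-map frequency table by a sort-then-scan over runs of equal values (alternative algorithm, same return value).


-- ===== PORT A =====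
def countExactOccurrences (arr : List Int) (exactOccurrences : Int) : Int :=
  let countElements : PySem.Dict Int Int :=
    arr.foldl (fun d element =>
      if d.contains element = false then d.insert element 1
      else d.insert element (d.getD element 0 + 1)) PySem.Dict.empty
  countElements.items.foldl
    (fun numCounter p => if p.2 == exactOccurrences then numCounter + 1 else numCounter) 0

-- ===== PORT B =====
-- state: (counter, run, prev); prev = none plays Python's initial None (guarded by run > 0)
def countExactOccurrences_alt (arr : List Int) (exactOccurrences : Int) : Int :=
  let st := (PySem.List.sorted arr (fun x => x) false).foldl
    (fun st x =>
      if st.2.1 > 0 && some x == st.2.2 then (st.1, st.2.1 + 1, st.2.2)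
      else ((if st.2.1 == exactOccurrences && st.2.1 > 0 then st.1 + 1 else st.1), 1, some x))
    ((0 : Int), (0 : Int), (none : Option Int))
  if st.2.1 == exactOccurrences && st.2.1 > 0 then st.1 + 1 else st.1

-- ===== PRECONDITION & SPEC =====
def Spec_countExactOccurrences (arr : List Int) (exactOccurrences : Int) (out : Int) : Prop := out = countExactOccurrences_alt arr exactOccurrences
instance (arr : List Int) (exactOccurrences : Int) (out : Int) : Decidable (Spec_countExactOccurrences arr exactOccurrences out) := by unfold Spec_countExactOccurrences; infer_instance

-- ===== CLAIM (what is proved, stated in full; the proofs are below) =====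
def Claim_equal_countExactOccurrences : Prop := ∀ (arr : List Int) (exactOccurrences : Int), Dom_countExactOccurrences arr exactOccurrences → Spec_countExactOccurrences arr exactOccurrences (countExactOccurrences arr exactOccurrences)

-- ===== LEMMAS AND PROOFS =====

-- the number of distinct values of t occurring exactly k times; both ports are proved equal to it
def pvD (k : Int) (t : List Int) : Int :=
  ((PySem.Set.ofList t).countP (fun v => (t.count v : Int) == k) : Int)

-- B's loop step and loop finish, named so the lemmas can speak about them (countExactOccurrences_alt unfolds to them by rfl)
def pvStep (k : Int) (st : Int × Int × Option Int) (x : Int) : Int × Int × Option Int :=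
  if st.2.1 > 0 && some x == st.2.2 then (st.1, st.2.1 + 1, st.2.2)
  else ((if st.2.1 == k && st.2.1 > 0 then st.1 + 1 else st.1), 1, some x)

def pvFin (k : Int) (st : Int × Int × Option Int) : Int :=
  if st.2.1 == k && st.2.1 > 0 then st.1 + 1 else st.1

lemma pvD_perm (k : Int) {s t : List Int} (h : s.Perm t) : pvD k s = pvD k t := by
  unfold pvD
  have hp : (PySem.Set.ofList s).Perm (PySem.Set.ofList t) := by
    rw [List.perm_ext_iff_of_nodup (PySem.Set.nodup_ofList s) (PySem.Set.nodup_ofList t)]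
    intro a; simp [PySem.Set.mem_ofList, h.mem_iff]
  have hpred : (fun v => ((s.count v : Int) == k)) = (fun v => ((t.count v : Int) == k)) := by
    funext v; rw [h.count_eq]
  rw [hpred, hp.countP_eq]

lemma pvD_cons (k : Int) (x : Int) (t : List Int) :
    pvD k (x :: t) = (if ((1 + t.count x : Int) == k) then 1 else 0)
      + pvD k (t.filter (fun y => y ≠ x)) := by
  unfold pvD
  have hmemf : ∀ a, a ∈ PySem.Set.ofList (t.filter (fun y => y ≠ x)) ↔ (a ∈ t ∧ a ≠ x) := by
    intro a; simp [PySem.Set.mem_ofList, List.mem_filter]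
  have hp : (PySem.Set.ofList (x :: t)).Perm (x :: PySem.Set.ofList (t.filter (fun y => y ≠ x))) := by
    rw [List.perm_ext_iff_of_nodup (PySem.Set.nodup_ofList _)]
    · intro a
      simp only [PySem.Set.mem_ofList, List.mem_cons, hmemf]
      by_cases hax : a = x <;> simp [hax]
    · exact List.nodup_cons.2 ⟨fun hm => ((hmemf x).1 hm).2 rfl, PySem.Set.nodup_ofList _⟩
  rw [hp.countP_eq, List.countP_cons]
  have hcx : ((x :: t).count x : Int) = 1 + t.count x := by
    simp [List.count_cons_self]; ring
  have hcong : (PySem.Set.ofList (t.filter (fun y => y ≠ x))).countP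
        (fun v => (((x :: t).count v : Int) == k))
      = (PySem.Set.ofList (t.filter (fun y => y ≠ x))).countP
        (fun v => (((t.filter (fun y => y ≠ x)).count v : Int) == k)) := by
    apply List.countP_congr
    intro v hv
    obtain ⟨hvt, hvx⟩ := (hmemf v).1 hv
    have h1 : (x :: t).count v = t.count v := by simp [Ne.symm hvx]
    have h2 : (t.filter (fun y => y ≠ x)).count v = t.count v := by
      rw [List.count_filter]; simp [hvx]
    rw [h1, h2]
  rw [hcong, hcx]
  by_cases hk : ((1 + t.count x : Int) == k) = true <;> simp [hk] <;> ring

lemma pvA_eq (arr : List Int) (k : Int) : countExactOccurrences arr k = pvD k arr := by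
  unfold countExactOccurrences
  have hstep : arr.foldl (fun d element =>
      if d.contains element = false then d.insert element 1
      else d.insert element (d.getD element 0 + 1)) PySem.Dict.empty
      = arr.foldl (fun d x => d.insert x (d.getD x 0 + 1)) (PySem.Dict.empty : PySem.Dict Int Int) := by
    apply PySem.List.foldl_congr_mem
    intro d e _
    by_cases hc : d.contains e = true
    · simp [hc]
    · simp only [Bool.not_eq_true] at hc
      simp [hc, PySem.Dict.getD_of_not_contains d 0 hc]
  simp only [hstep, PySem.Dict.foldl_insert_getD_add_one_eq_counter,
    PySem.Dict.items_counter]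
  rw [PySem.List.foldl_if_add_one]
  rw [List.countP_map]
  unfold pvD
  simp only [Function.comp_def]
  norm_num

lemma pvScan (k : Int) (s : List Int) : s.Pairwise (· ≤ ·) →
    ∀ (c run p : Int), 1 ≤ run → (∀ y ∈ s, p ≤ y) →
    pvFin k (s.foldl (pvStep k) (c, run, some p))
      = c + (if ((run + s.count p : Int) == k) then 1 else 0)
          + pvD k (s.filter (fun y => y ≠ p)) := by
  induction s with
  | nil =>
    intro _ c run p hrun _
    simp only [List.foldl_nil, List.count_nil, List.filter_nil, pvFin]
    have hpos : (run > 0) = True := by simp; omega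
    unfold pvD
    simp only [PySem.Set.ofList, List.countP_nil, hpos]
    by_cases hk : (run == k) = true <;> simp_all <;> omega
  | cons x rest ih =>
    intro hpw c run p hrun hle
    have hpwr : rest.Pairwise (· ≤ ·) := (List.pairwise_cons.1 hpw).2
    have hxle : ∀ y ∈ rest, x ≤ y := (List.pairwise_cons.1 hpw).1
    by_cases hx : x = p
    · subst hx
      have hcond : (pvStep k (c, run, some x) x) = (c, run + 1, some x) := by
        unfold pvStep; simp; omega
      rw [List.foldl_cons, hcond]
      rw [ih hpwr c (run + 1) x (by omega) (fun y hy => hxle y hy)]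
      have h1 : ((run + 1) + (rest.count x : Int)) = (run + ((x :: rest).count x : Int)) := by
        simp [List.count_cons_self]; push_cast; ring
      have h2 : (x :: rest).filter (fun y => y ≠ x) = rest.filter (fun y => y ≠ x) := by
        simp
      rw [h1, h2]
    · have hplt : p < x := lt_of_le_of_ne (hle x (List.mem_cons_self)) (Ne.symm hx)
      have hcond : (pvStep k (c, run, some p) x) =
          ((if run == k then c + 1 else c), 1, some x) := by
        unfold pvStep
        have : (some x == some p) = false := by simp [hx]
        simp [this, show (run > 0) = True by simp; omega]
      rw [List.foldl_cons, hcond]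
      rw [ih hpwr _ 1 x le_rfl hxle]
      have hcnt : ((x :: rest).count p : Int) = 0 := by
        have : p ∉ (x :: rest) := by
          intro hm
          rcases List.mem_cons.1 hm with h | h
          · exact hx h.symm
          · exact absurd (hxle p h) (by omega)
        simp [List.count_eq_zero.2 this]
      have hfil : (x :: rest).filter (fun y => y ≠ p) = x :: rest := by
        apply List.filter_eq_self.2
        intro y hy
        have hpy : p < y := by
          rcases List.mem_cons.1 hy with h | h
          · omega
          · exact lt_of_lt_of_le hplt (hxle y h)
        simp; omega
      rw [hcnt, hfil, pvD_cons k x rest]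
      by_cases hk : (run == k) = true
      · simp [hk, show ((run + 0 : Int) == k) = true by simpa using hk]; ring
      · simp [hk, show ((run + 0 : Int) == k) = false by simpa using hk]; ring

lemma pvB_eq (arr : List Int) (k : Int) : countExactOccurrences_alt arr k = pvD k arr := by
  have halt : countExactOccurrences_alt arr k
      = pvFin k ((PySem.List.sorted arr (fun x => x) false).foldl (pvStep k)
          ((0 : Int), (0 : Int), (none : Option Int))) := rfl
  rw [halt]
  have hperm : (PySem.List.sorted arr (fun x => x) false).Perm arr :=
    PySem.List.sorted_perm arr (fun x => x) false
  rw [show pvD k arr = pvD k (PySem.List.sorted arr (fun x => x) false) from (pvD_perm k hperm).symm]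
  have hpw : (PySem.List.sorted arr (fun x => x) false).Pairwise (· ≤ ·) := by
    have := PySem.List.sorted_pairwise (xs := arr) (key := fun x => x)
    simpa using this
  cases hs : PySem.List.sorted arr (fun x => x) false with
  | nil => simp [pvFin, pvD, PySem.Set.ofList]
  | cons x rest =>
    rw [hs] at hpw
    have hstep0 : pvStep k ((0 : Int), (0 : Int), (none : Option Int)) x = (0, 1, some x) := by
      unfold pvStep; simp
    rw [List.foldl_cons, hstep0]
    rw [pvScan k rest (List.pairwise_cons.1 hpw).2 0 1 x le_rfl (List.pairwise_cons.1 hpw).1]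
    rw [pvD_cons k x rest]
    ring

-- ===== VERDICT (by name: the statement is the Claim_ definition above) =====
theorem countExactOccurrences_spec : Claim_equal_countExactOccurrences := by
  intro arr k _
  unfold Spec_countExactOccurrences
  rw [pvA_eq, pvB_eq]
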